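-- pv_equiv track=rewrite | github.com/dawsonblock/TURB0 | tools/verify_dist_contents.py | _missing_prefixes
-- ===== SOURCE A (Python) =====
-- def _missing_prefixes(
--     members: tuple[str, ...],
--     required: tuple[str, ...],
-- ) -> list[str]:
--     return sorted(
--         prefix
--         for prefix in required
--         if not any(member.startswith(prefix) for member in members)
--     )
-- ===== SOURCE B (Python) =====
-- def _missing_prefixes(
--     members: tuple[str, ...],
--     required: tuple[str, ...],
-- ) -> list[str]:
--     known = set()
--     for member in members:
--         for k in range(len(member) + 1):
--             known.add(member[:k])
--     return sorted(p for p in required if p not in known)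
-- ===== Notes on version B (the rewrite author's own statement) =====
-- stated objective: faster
-- what changed: B builds a hash set of all prefixes of the members once, so the per-required-prefix scan over all members disappears and each required prefix becomes a single set lookup.
import Mathlib
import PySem

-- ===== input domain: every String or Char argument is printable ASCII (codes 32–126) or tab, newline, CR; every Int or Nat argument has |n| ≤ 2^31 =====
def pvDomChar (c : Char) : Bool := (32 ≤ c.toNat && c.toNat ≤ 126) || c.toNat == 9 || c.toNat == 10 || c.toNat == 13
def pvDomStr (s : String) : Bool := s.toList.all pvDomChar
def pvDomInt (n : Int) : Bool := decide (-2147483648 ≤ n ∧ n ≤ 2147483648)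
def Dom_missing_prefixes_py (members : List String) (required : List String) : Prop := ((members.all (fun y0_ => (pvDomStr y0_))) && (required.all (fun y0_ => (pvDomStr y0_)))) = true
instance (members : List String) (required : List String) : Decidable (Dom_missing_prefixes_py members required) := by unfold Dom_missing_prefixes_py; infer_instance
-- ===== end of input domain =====

-- B replaces A's per-prefix scan of all members by a set of all member prefixes built once; same return value, proved equal.


-- ===== PORT A =====
def missing_prefixes_py (members : List String) (required : List String) : List String :=
  PySem.List.sorted
    (required.filter (fun pfx => !(members.any (fun member => PySem.Str.startswith member pfx))))
    (fun x => x) false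

-- ===== PORT B =====
def missing_prefixes_py_alt (members : List String) (required : List String) : List String :=
  let known : PySem.Set String :=
    members.foldl
      (fun known member =>
        (PySem.List.pyRange 0 (PySem.Str.len member + 1) 1).foldl
          (fun known k => PySem.Set.add known (PySem.Str.slice member none (some k))) known)
      PySem.Set.empty
  PySem.List.sorted (required.filter (fun p => !(PySem.Set.contains known p))) (fun x => x) false

-- ===== PRECONDITION & SPEC =====
def Spec_missing_prefixes_py (members : List String) (required : List String) (out : List String) : Prop := out = missing_prefixes_py_alt members required
instance (members : List String) (required : List String) (out : List String) : Decidable (Spec_missing_prefixes_py members required out) := by unfold Spec_missing_prefixes_py; infer_instance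

-- ===== CLAIM (what is proved, stated in full; the proofs are below) =====
def Claim_equal_missing_prefixes_py : Prop := ∀ (members : List String) (required : List String), Dom_missing_prefixes_py members required → Spec_missing_prefixes_py members required (missing_prefixes_py members required)

-- ===== LEMMAS AND PROOFS =====

-- membership after folding the prefixes of one member into the set
lemma mem_fold_prefixes (m : String) (n : Nat) (s : PySem.Set String) (p : String) :
    p ∈ (List.range n).foldl
          (fun acc (k : Nat) => PySem.Set.add acc (PySem.Str.slice m none (some (k : Int)))) s
    ↔ p ∈ s ∨ ∃ k < n, p.toList = m.toList.take k := by
  induction n generalizing s with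
  | zero => simp
  | succ n ih =>
    rw [List.range_succ, List.foldl_append]
    simp only [List.foldl_cons, List.foldl_nil]
    rw [PySem.Set.mem_add, ih]
    constructor
    · rintro ((h | ⟨k, hk, hp⟩) | h)
      · exact Or.inl h
      · exact Or.inr ⟨k, Nat.lt_succ_of_lt hk, hp⟩
      · refine Or.inr ⟨n, Nat.lt_succ_self n, ?_⟩
        have := congrArg String.toList h
        simpa [PySem.List.slice_to_natCast] using this
    · rintro (h | ⟨k, hk, hp⟩)
      · exact Or.inl (Or.inl h)
      · rcases Nat.lt_succ_iff_lt_or_eq.1 hk with hk' | rfl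
        · exact Or.inl (Or.inr ⟨k, hk', hp⟩)
        · refine Or.inr ?_
          apply String.toList_injective
          simpa [PySem.List.slice_to_natCast] using hp

-- prefixes of m up to its length are exactly the strings m starts with
lemma exists_take_iff_startswith (m p : String) :
    (∃ k < m.toList.length + 1, p.toList = m.toList.take k)
    ↔ PySem.Str.startswith m p = true := by
  rw [show PySem.Str.startswith m p = PySem.Chars.startswith m.toList p.toList from by simp,
      PySem.Chars.startswith_iff]
  constructor
  · rintro ⟨k, _, hp⟩; exact hp ▸ List.take_prefix k m.toList
  · intro h
    exact ⟨p.toList.length, Nat.lt_succ_of_le h.length_le, List.prefix_iff_eq_take.1 h⟩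

-- membership in the full known-prefix set
lemma mem_known (members : List String) (s : PySem.Set String) (p : String) :
    p ∈ members.foldl
          (fun known member =>
            (PySem.List.pyRange 0 (PySem.Str.len member + 1) 1).foldl
              (fun known k => PySem.Set.add known (PySem.Str.slice member none (some k))) known)
          s
    ↔ p ∈ s ∨ ∃ m ∈ members, PySem.Str.startswith m p = true := by
  induction members generalizing s with
  | nil => simp
  | cons m ms ih =>
    simp only [List.foldl_cons]
    rw [ih]
    have hrange : PySem.List.pyRange 0 (PySem.Str.len m + 1) 1
        = (List.range (m.toList.length + 1)).map (fun (k : Nat) => (k : Int)) := by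
      rw [PySem.List.pyRange_one]
      simp [PySem.Str.len_eq]
    rw [hrange, List.foldl_map, mem_fold_prefixes, exists_take_iff_startswith]
    constructor
    · rintro ((h | h) | ⟨x, hx, hs⟩)
      · exact Or.inl h
      · exact Or.inr ⟨m, List.mem_cons_self, h⟩
      · exact Or.inr ⟨x, List.mem_cons_of_mem _ hx, hs⟩
    · rintro (h | ⟨x, hx, hs⟩)
      · exact Or.inl (Or.inl h)
      · rcases List.mem_cons.1 hx with rfl | hx
        · exact Or.inl (Or.inr hs)
        · exact Or.inr ⟨x, hx, hs⟩

-- ===== VERDICT (by name: the statement is the Claim_ definition above) =====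
theorem missing_prefixes_py_spec : Claim_equal_missing_prefixes_py := by
  intro members required _
  unfold Spec_missing_prefixes_py missing_prefixes_py missing_prefixes_py_alt
  congr 1
  apply List.filter_congr
  intro p _
  have h := mem_known members PySem.Set.empty p
  simp only [PySem.Set.empty, List.not_mem_nil, false_or] at h
  congr 1
  rw [Bool.eq_iff_iff, PySem.Set.contains_iff, List.any_eq_true]
  simp only [PySem.Set.empty]
  exact h.symm
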